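-- pv_equiv track=rewrite | github.com/Tofu-Gang/advent_of_code_2024 | src/day_09/puzzle.py | _file_size
-- ===== SOURCE A (Python) =====
-- from typing import List
--
-- def _file_size(start_index: int, blocks: List[str]) -> int:
--     """
--     :param start_index: block index
--     :param blocks: list of disk blocks, each containing either free space or
--     file ID
--     :return: file size containing the block on the param index or zero if there
--     is no file on that index
--     """
--
--     if blocks[start_index].isnumeric():
--         file_id = blocks[start_index]
--         file_size = 1
--         i = start_index + 1
--         while i < len(blocks) and blocks[i] == file_id:
--             i += 1
--             file_size += 1
--
--         i = start_index - 1
--         while i >= 0 and blocks[i] == file_id: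
--             file_size += 1
--             i -= 1
--
--         return file_size
--     else:
--         return 0
-- ===== SOURCE B (Python) =====
-- from typing import List
--
-- def _file_size(start_index: int, blocks: List[str]) -> int:
--     """Partition the disk into maximal runs of equal blocks in one left-to-right
--     sweep and return the length of the run containing start_index (0 if it is
--     free space)."""
--     n = len(blocks)
--     i = 0
--     while i < n:
--         j = i + 1
--         while j < n and blocks[j] == blocks[i]:
--             j += 1
--         if i <= start_index < j:
--             return (j - i) if blocks[i].isnumeric() else 0
--         i = j
--     raise IndexError("block index out of range")
-- ===== Notes on version B (the rewrite author's own statement) =====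
-- stated objective: alternative
-- what changed: B makes one left-to-right sweep partitioning the list into maximal runs of equal blocks and returns the length of the run whose index interval contains start_index, instead of A's bidirectional expansion outward from start_index; Pre_ excludes out-of-range indices (A raises IndexError) and negative in-range indices, where A's value mixes Python's wrapped element access with unwrapped loop bounds and B's run sweep naturally raises IndexError.
-- outside the precondition, e.g. on _file_size(-1, ['2', '2', '1', '2']): A returns 3, B raises IndexError
import Mathlib
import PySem

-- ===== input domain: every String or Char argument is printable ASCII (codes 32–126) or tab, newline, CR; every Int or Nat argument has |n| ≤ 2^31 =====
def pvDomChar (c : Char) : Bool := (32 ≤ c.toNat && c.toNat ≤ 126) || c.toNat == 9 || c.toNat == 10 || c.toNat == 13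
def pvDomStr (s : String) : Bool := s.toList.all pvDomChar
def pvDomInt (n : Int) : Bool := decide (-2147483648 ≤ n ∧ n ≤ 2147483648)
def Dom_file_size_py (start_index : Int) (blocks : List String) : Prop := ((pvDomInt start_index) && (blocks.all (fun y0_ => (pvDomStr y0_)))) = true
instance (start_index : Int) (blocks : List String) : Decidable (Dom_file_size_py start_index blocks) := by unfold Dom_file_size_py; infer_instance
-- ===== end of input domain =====

-- B partitions the disk into maximal runs of equal blocks in ONE left-to-right sweep and
-- returns the length of the run containing start_index, instead of A's bidirectional
-- expansion outward from start_index (objective: alternative decomposition, same cost).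

-- ===== PORT A =====
-- first while loop of A: expand right from i while blocks[i] == fid, counting into size
def fsRight (blocks : List String) (fid : String) (i : Int) (size : Int) : Int :=
  if h : i < (blocks.length : Int) ∧ (PySem.List.pyGet? blocks i).getD "" = fid then
    fsRight blocks fid (i + 1) (size + 1)
  else size
termination_by ((blocks.length : Int) - i).toNat
decreasing_by omega

-- second while loop of A: expand left from i while i >= 0 and blocks[i] == fid
def fsLeft (blocks : List String) (fid : String) (i : Int) (size : Int) : Int :=
  if h : 0 ≤ i ∧ (PySem.List.pyGet? blocks i).getD "" = fid then
    fsLeft blocks fid (i - 1) (size + 1)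
  else size
termination_by (i + 1).toNat
decreasing_by omega

-- Python's .isnumeric() is ported as PySem.Str.strIsdigit (exact on the printable-ASCII domain Dom,
-- where isnumeric and isdigit coincide)
def file_size_py (start_index : Int) (blocks : List String) : Int :=
  match PySem.List.pyGet? blocks start_index with
  | none => 0  -- IndexError in Python; excluded by Pre_file_size_py
  | some b =>
    if PySem.Str.strIsdigit b then
      fsLeft blocks b (start_index - 1) (fsRight blocks b (start_index + 1) 1)
    else 0

-- ===== PORT B =====
-- inner while loop of B: advance j past the run of blocks equal to v
def runEnd (blocks : List String) (v : String) (j : Int) : Int :=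
  if h : j < (blocks.length : Int) ∧ (PySem.List.pyGet? blocks j).getD "" = v then
    runEnd blocks v (j + 1)
  else j
termination_by ((blocks.length : Int) - j).toNat
decreasing_by omega

-- cited by altLoop's decreasing_by
theorem runEnd_ge (blocks : List String) (v : String) (j : Int) : j ≤ runEnd blocks v j := by
  rw [runEnd]
  split
  · have ih := runEnd_ge blocks v (j + 1); omega
  · omega
termination_by ((blocks.length : Int) - j).toNat
decreasing_by omega

-- outer while loop of B over the runs
def altLoop (start_index : Int) (blocks : List String) (i : Int) : Int :=
  if _h : i < (blocks.length : Int) then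
    let j := runEnd blocks ((PySem.List.pyGet? blocks i).getD "") (i + 1)
    if i ≤ start_index ∧ start_index < j then
      if PySem.Str.strIsdigit ((PySem.List.pyGet? blocks i).getD "") then j - i else 0
    else altLoop start_index blocks j
  else 0  -- loop fell through: Python raises IndexError; excluded by Pre_file_size_py
termination_by ((blocks.length : Int) - i).toNat
decreasing_by
  have := runEnd_ge blocks ((PySem.List.pyGet? blocks i).getD "") (i + 1)
  omega

def file_size_py_alt (start_index : Int) (blocks : List String) : Int :=
  altLoop start_index blocks 0

-- ===== PRECONDITION & SPEC =====
-- Pre_ excludes out-of-range indices (A raises IndexError there) and negative in-range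
-- indices, where A's returned value mixes Python's wrapped element access blocks[start_index]
-- with unwrapped loop bounds and B's run sweep naturally raises IndexError.
def Pre_file_size_py (start_index : Int) (blocks : List String) : Prop :=
  0 ≤ start_index ∧ start_index < (blocks.length : Int)
instance (start_index : Int) (blocks : List String) : Decidable (Pre_file_size_py start_index blocks) := by unfold Pre_file_size_py; infer_instance

def pvWitness_file_size_py : Int × List String := (1, ["2", "2", "1"])

def Spec_file_size_py (start_index : Int) (blocks : List String) (out : Int) : Prop := out = file_size_py_alt start_index blocks
instance (start_index : Int) (blocks : List String) (out : Int) : Decidable (Spec_file_size_py start_index blocks out) := by unfold Spec_file_size_py; infer_instance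

-- ===== CLAIM (what is proved, stated in full; the proofs are below) =====
def Claim_equal_file_size_py : Prop := ∀ (start_index : Int) (blocks : List String), Dom_file_size_py start_index blocks → Pre_file_size_py start_index blocks → Spec_file_size_py start_index blocks (file_size_py start_index blocks)

-- ===== LEMMAS AND PROOFS =====

-- characterisation of runEnd: it is the end of the maximal run of v starting at j
theorem runEnd_spec (blocks : List String) (v : String) (j : Int)
    (hjn : j ≤ (blocks.length : Int)) :
    runEnd blocks v j ≤ (blocks.length : Int) ∧
    (∀ k, j ≤ k → k < runEnd blocks v j → (PySem.List.pyGet? blocks k).getD "" = v) ∧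
    (runEnd blocks v j < (blocks.length : Int) →
      (PySem.List.pyGet? blocks (runEnd blocks v j)).getD "" ≠ v) := by
  rw [runEnd]
  split
  · rename_i h
    have hge := runEnd_ge blocks v (j + 1)
    obtain ⟨ih1, ih2, ih3⟩ := runEnd_spec blocks v (j + 1) (by omega)
    refine ⟨ih1, ?_, ih3⟩
    intro k hk1 hk2
    rcases eq_or_lt_of_le hk1 with rfl | hlt
    · exact h.2
    · exact ih2 k (by omega) hk2
  · rename_i h
    refine ⟨hjn, by omega, fun h1 h2 => h ⟨h1, h2⟩⟩
termination_by ((blocks.length : Int) - j).toNat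
decreasing_by omega

-- characterisation of A's right expansion given the run end e
theorem fsRight_spec (blocks : List String) (fid : String) (j e : Int)
    (hje : j ≤ e) (hen : e ≤ (blocks.length : Int))
    (hrun : ∀ k, j ≤ k → k < e → (PySem.List.pyGet? blocks k).getD "" = fid)
    (hstop : e < (blocks.length : Int) → (PySem.List.pyGet? blocks e).getD "" ≠ fid)
    (size : Int) : fsRight blocks fid j size = size + (e - j) := by
  rw [fsRight]
  split
  · rename_i h
    have hlt : j < e := by
      rcases eq_or_lt_of_le hje with rfl | hlt
      · exact absurd h.2 (hstop h.1)
      · exact hlt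
    have ih := fsRight_spec blocks fid (j + 1) e (by omega) hen
      (fun k hk1 hk2 => hrun k (by omega) hk2) hstop (size + 1)
    omega
  · rename_i h
    have : j = e := by
      by_contra hne
      exact h ⟨by omega, hrun j le_rfl (by omega)⟩
    omega
termination_by (e - j).toNat
decreasing_by omega

-- characterisation of A's left expansion given the run start i
theorem fsLeft_spec (blocks : List String) (fid : String) (i : Int)
    (hi : 0 ≤ i)
    (hleft : i = 0 ∨ (PySem.List.pyGet? blocks (i - 1)).getD "" ≠ fid)
    (k : Int) (hk : i - 1 ≤ k)
    (hrun : ∀ m, i ≤ m → m ≤ k → (PySem.List.pyGet? blocks m).getD "" = fid)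
    (size : Int) : fsLeft blocks fid k size = size + (k - i + 1) := by
  rw [fsLeft]
  split
  · rename_i h
    have hki : i ≤ k := by
      by_contra hlt
      have hk1 : k = i - 1 := by omega
      rcases hleft with h0 | hne
      · omega
      · exact hne (hk1 ▸ h.2)
    have ih := fsLeft_spec blocks fid i hi hleft (k - 1) (by omega)
      (fun m hm1 hm2 => hrun m hm1 (by omega)) (size + 1)
    omega
  · rename_i h
    have : k = i - 1 := by
      by_contra hne
      exact h ⟨by omega, hrun k (by omega) le_rfl⟩
    omega
termination_by (k - i + 1).toNat
decreasing_by omega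

-- main loop invariant: once B's sweep reaches the start i of a maximal run with i ≤ s,
-- it returns exactly what A computes by expanding around s (fuel d bounds s - i)
theorem altLoop_eq (blocks : List String) (s : Int) (hs0 : 0 ≤ s)
    (hsn : s < (blocks.length : Int)) :
    ∀ (d : Nat) (i : Int), (s - i).toNat < d → 0 ≤ i → i ≤ s →
    (i = 0 ∨ (PySem.List.pyGet? blocks (i - 1)).getD "" ≠ (PySem.List.pyGet? blocks i).getD "") →
    altLoop s blocks i =
      (if PySem.Str.strIsdigit ((PySem.List.pyGet? blocks s).getD "") then
        fsLeft blocks ((PySem.List.pyGet? blocks s).getD "") (s - 1)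
          (fsRight blocks ((PySem.List.pyGet? blocks s).getD "") (s + 1) 1)
      else 0) := by
  intro d
  induction d with
  | zero => intro i hd; omega
  | succ d ih =>
    intro i hd hi0 his hinv
    rw [altLoop]
    rw [dif_pos (by omega)]
    set gi := (PySem.List.pyGet? blocks i).getD "" with hgi
    set j := runEnd blocks gi (i + 1) with hj
    have hge : i + 1 ≤ j := runEnd_ge blocks gi (i + 1)
    obtain ⟨hjn, hrun, hstop⟩ := runEnd_spec blocks gi (i + 1) (by omega)
    by_cases hfound : s < j
    · rw [if_pos ⟨his, hfound⟩]
      have hgs : (PySem.List.pyGet? blocks s).getD "" = gi := by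
        rcases eq_or_lt_of_le his with rfl | hlt
        · rfl
        · exact hrun s (by omega) hfound
      rw [hgs]
      by_cases hd : PySem.Str.strIsdigit gi
      · simp only [if_pos hd]
        have hr : fsRight blocks gi (s + 1) 1 = 1 + (j - (s + 1)) :=
          fsRight_spec blocks gi (s + 1) j (by omega) hjn
            (fun k hk1 hk2 => hrun k (by omega) hk2) hstop 1
        have hl : fsLeft blocks gi (s - 1) (1 + (j - (s + 1))) = 1 + (j - (s + 1)) + (s - 1 - i + 1) :=
          fsLeft_spec blocks gi i hi0 hinv (s - 1) (by omega)
            (fun m hm1 hm2 => by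
              rcases eq_or_lt_of_le hm1 with rfl | hlt
              · rfl
              · exact hrun m (by omega) (by omega)) (1 + (j - (s + 1)))
        rw [hr, hl]
        omega
      · simp only [if_neg hd]
    · rw [if_neg (fun hc => hfound hc.2)]
      exact ih j (by omega) (by omega) (by omega)
        (Or.inr (by
          have h1 : (PySem.List.pyGet? blocks (j - 1)).getD "" = gi := by
            rcases eq_or_lt_of_le hge with heq | hlt
            · have hji : j - 1 = i := by omega
              rw [hji, hgi]
            · exact hrun (j - 1) (by omega) (by omega)
          have h2 : (PySem.List.pyGet? blocks j).getD "" ≠ gi := hstop (by omega)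
          rw [h1]
          exact fun hc => h2 hc.symm))

-- ===== VERDICT (by name: the statement is the Claim_ definition above) =====
theorem file_size_py_spec : Claim_equal_file_size_py := by
  intro s blocks _ hpre
  obtain ⟨hs0, hsn⟩ := hpre
  unfold Spec_file_size_py file_size_py file_size_py_alt
  rw [altLoop_eq blocks s hs0 hsn (s.toNat + 1) 0 (by omega) le_rfl hs0 (Or.inl rfl)]
  rw [PySem.List.pyGet?_eq_some_getElem blocks hs0 hsn]
  simp
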